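-- pv_equiv track=rewrite | github.com/pparkddo/ps | leetcode/weekly-contest/491/3.py | minimumOR
-- ===== SOURCE A (Python) =====
-- from typing import List
--
-- def minimumOR(grid: List[List[int]]) -> int:
--     ans = 0
--     candidates = [row[:] for row in grid]
--
--     for bit in range(16, -1, -1):
--         mask = 1 << bit
--         can_avoid = all(
--             any((x & mask) == 0 for x in row)
--             for row in candidates
--         )
--
--         if can_avoid:
--             for i in range(len(candidates)):
--                 candidates[i] = [x for x in candidates[i] if (x & mask) == 0]
--         else:
--             ans |= mask
--
--     return ans
-- ===== SOURCE B (Python) =====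
-- from typing import List
--
-- def minimumOR(grid: List[List[int]]) -> int:
--     # Exhaustive search: the answer is the numerically smallest 17-bit mask m such that
--     # every row contains an element whose low 17 bits are a submask of m (feasibility is
--     # superset-monotone, so the smallest feasible mask is exactly the minimum achievable OR).
--     full = (1 << 17) - 1
--     pats = [{x & full for x in row} for row in grid]
--     for m in range(full + 1):
--         if all(any(p & ~m == 0 for p in ps) for ps in pats):
--             return m
--     return full  # some row is empty: no mask is feasible, every bit is forced
-- ===== Notes on version B (the rewrite author's own statement) =====
-- stated objective: alternative
-- what changed: B replaces A's high-to-low greedy bit elimination with pruned candidate lists by an exhaustive ascending scan over all 2^17 masks, returning the numerically smallest mask m such that every row (reduced once to its set of low-17-bit patterns) contains a submask of m; superset-monotonicity of feasibility makes this minimum equal A's greedy result.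
import Mathlib
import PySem

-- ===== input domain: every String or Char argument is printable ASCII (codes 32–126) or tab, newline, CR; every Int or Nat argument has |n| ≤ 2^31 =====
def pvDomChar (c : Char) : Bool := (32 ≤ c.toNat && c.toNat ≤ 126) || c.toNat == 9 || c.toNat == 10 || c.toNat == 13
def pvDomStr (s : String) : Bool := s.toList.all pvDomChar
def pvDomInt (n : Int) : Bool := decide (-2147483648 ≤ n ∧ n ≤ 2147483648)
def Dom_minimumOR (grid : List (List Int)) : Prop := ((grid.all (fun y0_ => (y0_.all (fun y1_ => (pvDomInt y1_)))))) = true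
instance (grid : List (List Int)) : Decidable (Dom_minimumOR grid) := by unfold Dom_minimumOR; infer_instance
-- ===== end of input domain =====

-- B replaces A's high-to-low greedy bit elimination over pruned candidate lists by an
-- exhaustive ascending scan for the numerically smallest feasible 17-bit mask
-- (objective: alternative — a different algorithm of similar practical cost).

-- ===== PORT A =====
-- one iteration of A's bit loop: state = (ans, candidates)
def pvStepA (st : Int × List (List Int)) (bit : Int) : Int × List (List Int) :=
  let mask : Int := (1 : Int) <<< bit.toNat
  let canAvoid : Bool :=
    st.2.all (fun row => row.any (fun x => PySem.Int.band x mask == 0))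
  if canAvoid then
    (st.1, st.2.map (fun row => row.filter (fun x => PySem.Int.band x mask == 0)))
  else
    (PySem.Int.bor st.1 mask, st.2)

def minimumOR (grid : List (List Int)) : Int :=
  let candidates := grid.map (fun row => row)   -- [row[:] for row in grid]
  ((PySem.List.pyRange 16 (-1) (-1)).foldl pvStepA (0, candidates)).1

-- ===== PORT B =====
-- the for-loop with early return: first m in the list passing the feasibility test, else 131071
def pvScanB (pats : List (PySem.Set Int)) : List Int → Int
  | [] => 131071
  | m :: rest =>
    if pats.all (fun ps => ps.any (fun p => PySem.Int.band p (Int.not m) == 0)) then m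
    else pvScanB pats rest

def minimumOR_alt (grid : List (List Int)) : Int :=
  let full : Int := ((1 : Int) <<< (17 : Nat)) - 1
  let pats : List (PySem.Set Int) :=
    grid.map (fun row => PySem.Set.ofList (row.map (fun x => PySem.Int.band x full)))
  pvScanB pats (PySem.List.pyRange 0 (full + 1) 1)

-- ===== PRECONDITION & SPEC =====
def Spec_minimumOR (grid : List (List Int)) (out : Int) : Prop := out = minimumOR_alt grid
instance (grid : List (List Int)) (out : Int) : Decidable (Spec_minimumOR grid out) := by unfold Spec_minimumOR; infer_instance

-- ===== CLAIM (what is proved, stated in full; the proofs are below) =====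
def Claim_equal_minimumOR : Prop := ∀ (grid : List (List Int)), Dom_minimumOR grid → Spec_minimumOR grid (minimumOR grid)

-- ===== LEMMAS AND PROOFS =====

-- ---- generic bit lemmas ----

-- a = 0 iff no bit of a is set
theorem pv_nat_eq_zero_iff_testBit (a : Nat) : a = 0 ↔ ∀ i, a.testBit i = false := by
  constructor
  · intro h i; simp [h]
  · intro h; exact Nat.eq_of_testBit_eq (fun i => by simp [h i])

-- m is a submask of k iff every set bit of m is set in k
theorem pv_and_eq_self_iff (m k : Nat) : m &&& k = m ↔ ∀ i, m.testBit i = true → k.testBit i = true := by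
  constructor
  · intro h i hi
    have h2 := congrArg (fun t => Nat.testBit t i) h
    simp only [Nat.testBit_and, hi, Bool.true_and] at h2
    exact h2
  · intro h
    exact Nat.eq_of_testBit_eq (fun i => by
      rw [Nat.testBit_and]
      cases hm : m.testBit i
      · simp
      · simp [h i hm])

-- disjoint bits add like they or
theorem pv_add_eq_or (a : Nat) : ∀ b : Nat, a &&& b = 0 → a + b = a ||| b := by
  induction a using Nat.binaryRec with
  | zero => simp
  | bit cx m ih =>
    intro b h
    induction b using Nat.binaryRec with
    | zero => simp
    | bit cy n _ =>
      rw [Nat.land_bit, Nat.bit_eq_zero_iff] at h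
      have h2 := ih n h.1
      rw [Nat.lor_bit, Nat.bit_val, Nat.bit_val, Nat.bit_val, ← h2]
      have : cx.toNat + cy.toNat = (cx || cy).toNat := by
        cases cx <;> cases cy <;> simp_all
      omega

-- subtracting a submask is xor
theorem pv_sub_eq_xor (a b : Nat) (h : a &&& b = a) : b - a = b ^^^ a := by
  have hd : (b ^^^ a) &&& a = 0 := by
    rw [pv_nat_eq_zero_iff_testBit]
    intro i
    have := (pv_and_eq_self_iff a b).1 h i
    simp only [Nat.testBit_and, Nat.testBit_xor]
    cases ha : a.testBit i
    · simp
    · simp [this ha]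
  have hsum : (b ^^^ a) + a = b := by
    rw [pv_add_eq_or _ _ hd]
    apply Nat.eq_of_testBit_eq
    intro i
    have := (pv_and_eq_self_iff a b).1 h i
    simp only [Nat.testBit_or, Nat.testBit_xor]
    cases ha : a.testBit i
    · simp
    · simp [this ha]
  omega

-- 2^k + g (g < 2^k) is 2^k ||| g
theorem pv_pow_add_eq_or (k g : Nat) (h : g < 2 ^ k) : 2 ^ k + g = 2 ^ k ||| g := by
  apply pv_add_eq_or
  rw [pv_nat_eq_zero_iff_testBit]
  intro i
  simp only [Nat.testBit_and, Nat.testBit_two_pow]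
  by_cases hik : k = i
  · subst hik; simp [Nat.testBit_eq_false_of_lt h]
  · simp [hik]

-- x below 2^n has no bits ≥ n
theorem pv_testBit_ge_false (x n i : Nat) (hx : x < 2 ^ n) (hi : n ≤ i) : x.testBit i = false :=
  Nat.testBit_eq_false_of_lt (lt_of_lt_of_le hx (Nat.pow_le_pow_right (by omega) hi))

-- ---- Python bit semantics ----

-- bit i of the infinite two's-complement representation of x
def pvBit (x : Int) (i : Nat) : Bool :=
  if 0 ≤ x then x.toNat.testBit i else !((-x - 1).toNat.testBit i)

-- evaluate Python's `x & m` for negative x and nonnegative mask m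
theorem pv_band_neg (x : Int) (hx : x < 0) (m : Nat) :
    PySem.Int.band x (m : Int) = ((m - (m &&& (-x - 1).toNat) : Nat) : Int) := by
  simp [PySem.Int.band, not_le.2 hx]

theorem pv_band_nonneg (x : Int) (m : Nat) : 0 ≤ PySem.Int.band x (m : Int) := by
  rw [PySem.Int.band_comm]
  exact PySem.Int.band_nonneg_of_nonneg_left x (by positivity)

-- bits of (x & m) for a nonnegative mask m
theorem pv_band_toNat_testBit (x : Int) (m : Nat) (i : Nat) :
    ((PySem.Int.band x (m : Int)).toNat).testBit i = (m.testBit i && pvBit x i) := by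
  by_cases hx : 0 ≤ x
  · rw [PySem.Int.band_of_nonneg hx (by positivity)]
    simp [pvBit, hx, Nat.testBit_and, Bool.and_comm]
  · rw [not_le] at hx
    rw [pv_band_neg x hx m]
    have hsub : m &&& (-x - 1).toNat &&& m = m &&& (-x - 1).toNat := by
      apply Nat.eq_of_testBit_eq
      intro j
      simp only [Nat.testBit_and]
      cases m.testBit j <;> cases ((-x - 1).toNat).testBit j <;> simp
    rw [Int.toNat_natCast, pv_sub_eq_xor _ _ hsub]
    simp only [Nat.testBit_xor, Nat.testBit_and, pvBit, if_neg (not_le.2 hx)]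
    cases m.testBit i <;> cases ((-x - 1).toNat).testBit i <;> simp

-- x & m == 0 iff no set bit of m is a set bit of x
theorem pv_band_eq_zero_iff (x : Int) (m : Nat) :
    PySem.Int.band x (m : Int) = 0 ↔ ∀ i, m.testBit i = true → pvBit x i = false := by
  have h0 : PySem.Int.band x (m : Int) = ((PySem.Int.band x (m : Int)).toNat : Int) :=
    (Int.toNat_of_nonneg (pv_band_nonneg x m)).symm
  rw [h0]
  simp only [Nat.cast_eq_zero]
  rw [pv_nat_eq_zero_iff_testBit]
  constructor
  · intro h i hi
    have := h i
    rw [pv_band_toNat_testBit, hi, Bool.true_and] at this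
    exact this
  · intro h i
    rw [pv_band_toNat_testBit]
    cases hm : m.testBit i
    · simp
    · simp [h i hm]

-- ---- the 17-bit pattern of an element ----

def pvPatN (x : Int) : Nat := (PySem.Int.band x (131071 : Int)).toNat

theorem pv_patN_testBit (x : Int) (i : Nat) :
    (pvPatN x).testBit i = (decide (i < 17) && pvBit x i) := by
  have hc : (131071 : Int) = ((131071 : Nat) : Int) := by norm_num
  have hm : (131071 : Nat).testBit i = decide (i < 17) := by
    have : (131071 : Nat) = 2 ^ 17 - 1 := by norm_num
    rw [this, Nat.testBit_two_pow_sub_one]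
  rw [pvPatN, hc, pv_band_toNat_testBit, hm]

theorem pv_patN_lt (x : Int) : pvPatN x < 2 ^ 17 := by
  have hc : (131071 : Int) = ((131071 : Nat) : Int) := by norm_num
  have hle : pvPatN x ≤ 131071 := by
    by_cases hx : 0 ≤ x
    · rw [pvPatN, hc, PySem.Int.band_of_nonneg hx (by positivity)]
      simp only [Int.toNat_natCast]
      exact Nat.and_le_right
    · rw [not_le] at hx
      rw [pvPatN, hc, pv_band_neg x hx 131071, Int.toNat_natCast]
      exact Nat.sub_le _ _
  omega

-- ---- abstract feasibility and the greedy recursion ----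

def pvC (grid : List (List Int)) (s : Nat) : Bool :=
  grid.all (fun row => row.any (fun x => pvPatN x &&& s == 0))

def pvG (grid : List (List Int)) : Nat → Nat → Nat
  | 0, _ => 0
  | (k+1), av => if pvC grid (av ||| 2 ^ k) then pvG grid k (av ||| 2 ^ k) else 2 ^ k + pvG grid k av

theorem pvG_lt (grid : List (List Int)) (k : Nat) : ∀ av, pvG grid k av < 2 ^ k := by
  induction k with
  | zero => intro av; simp [pvG]
  | succ k ih =>
    intro av
    rw [pvG]
    split
    · exact lt_of_lt_of_le (ih _) (Nat.pow_le_pow_right (by omega) (by omega))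
    · have := ih av
      have : 2 ^ k + pvG grid k av < 2 ^ k + 2 ^ k := by omega
      calc 2 ^ k + pvG grid k av < 2 ^ k + 2 ^ k := this
        _ = 2 ^ (k + 1) := by ring

-- feasibility is antitone in the avoided-bit set
theorem pvC_mono (grid : List (List Int)) (s t : Nat) (hst : s &&& t = s)
    (ht : pvC grid t = true) : pvC grid s = true := by
  rw [pvC, List.all_eq_true] at *
  intro row hrow
  obtain ⟨x, hx, hxt⟩ := List.any_eq_true.1 (ht row hrow)
  refine List.any_eq_true.2 ⟨x, hx, ?_⟩
  rw [beq_iff_eq] at *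
  rw [pv_nat_eq_zero_iff_testBit] at *
  intro i
  have h1 := hxt i
  have h2 := (pv_and_eq_self_iff s t).1 hst i
  simp only [Nat.testBit_and] at *
  cases hp : (pvPatN x).testBit i with
  | false => simp
  | true =>
    cases hs : s.testBit i with
    | false => simp
    | true =>
      have h3 := h2 hs
      rw [hp, h3] at h1
      simp at h1

-- ---- bridging A's candidate-pruning fold to an avoid-mask greedy fold ----

-- proof-side abstraction of A's loop with the pruned lists replaced by an avoid mask
def pvStepB (grid : List (List Int)) (st : Int × Int) (bit : Int) : Int × Int :=
  let want : Int := PySem.Int.bor st.2 ((1 : Int) <<< bit.toNat)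
  if grid.all (fun row => row.any (fun x => PySem.Int.band x want == 0)) then
    (st.1, want)
  else
    (PySem.Int.bor st.1 ((1 : Int) <<< bit.toNat), st.2)

-- key fact: (x & (a|b)) == 0  iff  (x & a) == 0 and (x & b) == 0
theorem pv_band_or_zero (x : Int) (a b : Nat) :
    PySem.Int.band x ((a ||| b : Nat) : Int) = 0 ↔
      (PySem.Int.band x (a : Int) = 0 ∧ PySem.Int.band x (b : Int) = 0) := by
  rw [pv_band_eq_zero_iff, pv_band_eq_zero_iff, pv_band_eq_zero_iff]
  constructor
  · intro h
    exact ⟨fun i hi => h i (by simp [Nat.testBit_or, hi]),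
           fun i hi => h i (by simp [Nat.testBit_or, hi])⟩
  · rintro ⟨h1, h2⟩ i hi
    rcases Bool.or_eq_true_iff.mp (by simpa [Nat.testBit_or] using hi) with h | h
    exacts [h1 i h, h2 i h]

-- Bool form of the key fact
theorem pv_band_or_zero_bool (x : Int) (a b : Nat) :
    (PySem.Int.band x ((a ||| b : Nat) : Int) == 0) =
      ((PySem.Int.band x (a : Int) == 0) && (PySem.Int.band x (b : Int) == 0)) := by
  rw [Bool.eq_iff_iff]
  simp only [Bool.and_eq_true, beq_iff_eq]
  exact pv_band_or_zero x a b

theorem pv_one_shl (k : Nat) : (1 : Int) <<< k = ((1 <<< k : Nat) : Int) := by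
  simp [Int.shiftLeft_eq, Nat.shiftLeft_eq]

-- loop invariant: A's candidate lists are exactly the grid rows filtered by the avoid-mask
theorem pv_fold_eq (grid : List (List Int)) (bs : List Int) (ans : Int) (av : Nat) :
    (bs.foldl pvStepA
        (ans, grid.map (fun row => row.filter (fun x => PySem.Int.band x (av : Int) == 0)))).1
      = (bs.foldl (pvStepB grid) (ans, (av : Int))).1 := by
  induction bs generalizing ans av with
  | nil => rfl
  | cons bit bs ih =>
    have hmask : (1 : Int) <<< bit.toNat = ((1 <<< bit.toNat : Nat) : Int) := pv_one_shl _
    have hrow : ∀ row : List Int,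
        List.filter (fun x => PySem.Int.band x ((1 : Int) <<< bit.toNat) == 0)
          (List.filter (fun x => PySem.Int.band x (av : Int) == 0) row)
        = List.filter (fun x => PySem.Int.band x ((av ||| 1 <<< bit.toNat : Nat) : Int) == 0) row := by
      intro row
      rw [List.filter_filter]
      apply List.filter_congr
      intro x _
      rw [hmask, pv_band_or_zero_bool]
      cases h1 : (PySem.Int.band x (av : Int) == 0) <;>
        cases h2 : (PySem.Int.band x (((1 <<< bit.toNat : Nat) : Int)) == 0) <;> simp_all
    have hcond :
        (grid.all (fun row => row.any (fun x =>
            PySem.Int.band x (PySem.Int.bor (av : Int) ((1 : Int) <<< bit.toNat)) == 0)))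
          = (grid.map (fun row => row.filter (fun x => PySem.Int.band x (av : Int) == 0))).all
              (fun row => row.any (fun x => PySem.Int.band x ((1 : Int) <<< bit.toNat) == 0)) := by
      rw [List.all_map]
      apply congrArg
      funext row
      simp only [Function.comp_apply, List.any_filter]
      apply congrArg
      funext x
      rw [hmask, PySem.Int.bor_natCast, pv_band_or_zero_bool]
    by_cases hc :
        ((grid.map (fun row => row.filter (fun x => PySem.Int.band x (av : Int) == 0))).all
          (fun row => row.any (fun x => PySem.Int.band x ((1 : Int) <<< bit.toNat) == 0))) = true
    · -- can_avoid: A prunes every candidate row, the abstraction widens the avoid mask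
      have hA : pvStepA
            (ans, grid.map (fun row => row.filter (fun x => PySem.Int.band x (av : Int) == 0))) bit
          = (ans, grid.map (fun row => row.filter (fun x =>
              PySem.Int.band x ((av ||| 1 <<< bit.toNat : Nat) : Int) == 0))) := by
        simp only [pvStepA]
        rw [if_pos hc, List.map_map]
        exact congrArg (fun t => (ans, t)) (List.map_congr_left fun row _ => hrow row)
      have hB : pvStepB grid (ans, (av : Int)) bit
          = (ans, ((av ||| 1 <<< bit.toNat : Nat) : Int)) := by
        simp only [pvStepB]
        rw [if_pos (by rw [hcond]; exact hc), hmask, PySem.Int.bor_natCast]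
      rw [List.foldl_cons, List.foldl_cons, hA, hB]
      exact ih ans _
    · -- cannot avoid: both sides OR the bit into ans, the rest of the state is unchanged
      have hA : pvStepA
            (ans, grid.map (fun row => row.filter (fun x => PySem.Int.band x (av : Int) == 0))) bit
          = (PySem.Int.bor ans ((1 : Int) <<< bit.toNat),
             grid.map (fun row => row.filter (fun x => PySem.Int.band x (av : Int) == 0))) := by
        simp only [pvStepA]
        rw [if_neg hc]
      have hB : pvStepB grid (ans, (av : Int)) bit
          = (PySem.Int.bor ans ((1 : Int) <<< bit.toNat), (av : Int)) := by
        simp only [pvStepB]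
        rw [if_neg (by rw [hcond]; exact hc)]
      rw [List.foldl_cons, List.foldl_cons, hA, hB]
      exact ih _ av

-- ---- the masked test seen through 17-bit patterns ----

theorem pv_elem_cond (x : Int) (s : Nat) (hs : s < 2 ^ 17) :
    (PySem.Int.band x (s : Int) == 0) = (pvPatN x &&& s == 0) := by
  rw [Bool.eq_iff_iff]
  simp only [beq_iff_eq]
  rw [pv_band_eq_zero_iff, pv_nat_eq_zero_iff_testBit]
  constructor
  · intro h i
    simp only [Nat.testBit_and, pv_patN_testBit]
    cases hsi : s.testBit i
    · simp
    · simp [h i hsi]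
  · intro h i hsi
    have hi17 : i < 17 := by
      by_contra hge
      rw [pv_testBit_ge_false s 17 i hs (by omega)] at hsi
      exact Bool.false_ne_true hsi
    have := h i
    simp only [Nat.testBit_and, pv_patN_testBit, hsi, Bool.and_true] at this
    simpa [hi17] using this

theorem pv_cond_eq (grid : List (List Int)) (s : Nat) (hs : s < 2 ^ 17) :
    (grid.all (fun row => row.any (fun x => PySem.Int.band x (s : Int) == 0))) = pvC grid s := by
  apply congrArg
  funext row
  apply congrArg
  funext x
  exact pv_elem_cond x s hs

-- the avoid-mask fold computes the greedy recursion
theorem pv_foldB_eq_pvG (grid : List (List Int)) :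
    ∀ (k : Nat), k ≤ 17 → ∀ (ansN av : Nat), av < 2 ^ 17 →
    ((PySem.List.pyRange ((k : Int) - 1) (-1) (-1)).foldl (pvStepB grid)
        ((ansN : Int), (av : Int))).1 = ((ansN ||| pvG grid k av : Nat) : Int) := by
  intro k
  induction k with
  | zero =>
    intro _ ansN av _
    rw [show ((0 : Nat) : Int) - 1 = -1 by norm_num,
        PySem.List.pyRange_neg_one_eq_nil (by norm_num)]
    simp [pvG]
  | succ k ih =>
    intro hk ansN av hav
    have hk17 : k < 17 := by omega
    have hcast : ((k + 1 : Nat) : Int) - 1 = (k : Int) := by push_cast; ring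
    rw [hcast, PySem.List.pyRange_neg_one_cons (by omega), List.foldl_cons]
    have hpow : (2 : Nat) ^ k < 2 ^ 17 := Nat.pow_lt_pow_right (by omega) hk17
    have hor : av ||| 2 ^ k < 2 ^ 17 := Nat.or_lt_two_pow hav hpow
    have hwant : PySem.Int.bor (av : Int) ((1 : Int) <<< ((k : Int)).toNat)
        = ((av ||| 2 ^ k : Nat) : Int) := by
      rw [Int.toNat_natCast, pv_one_shl, PySem.Int.bor_natCast, Nat.one_shiftLeft]
    have hbit : (1 : Int) <<< ((k : Int)).toNat = ((2 ^ k : Nat) : Int) := by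
      rw [Int.toNat_natCast, pv_one_shl, Nat.one_shiftLeft]
    show ((PySem.List.pyRange ((k : Int) - 1) (-1) (-1)).foldl (pvStepB grid)
        (pvStepB grid ((ansN : Int), (av : Int)) (k : Int))).1 = _
    rw [pvStepB]
    simp only [hwant]
    rw [pv_cond_eq grid _ hor]
    by_cases hC : pvC grid (av ||| 2 ^ k) = true
    · rw [if_pos hC]
      rw [ih (by omega) ansN (av ||| 2 ^ k) hor]
      rw [pvG, if_pos hC]
    · rw [if_neg hC]
      simp only [hbit, PySem.Int.bor_natCast]
      rw [ih (by omega) (ansN ||| 2 ^ k) av hav]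
      rw [pvG, if_neg hC, pv_pow_add_eq_or _ _ (pvG_lt grid k av), Nat.lor_assoc]

-- ---- the greedy recursion finds the least feasible mask ----

theorem pv_find?_congr {α : Type} (p q : α → Bool) (l : List α) (h : ∀ x ∈ l, p x = q x) :
    l.find? p = l.find? q := by
  induction l with
  | nil => rfl
  | cons a l ih =>
    have ha := h a (by simp)
    rw [List.find?_cons, List.find?_cons, ha]
    cases hq : q a
    · exact ih (fun x hx => h x (by simp [hx]))
    · rfl

theorem pv_sub_or (s t : Nat) : s &&& (s ||| t) = s := by
  rw [pv_and_eq_self_iff]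
  intro i hi
  simp [Nat.testBit_or, hi]

-- complementing m < 2^k inside k+1 bits sets bit k
theorem pv_xor_hi (k m : Nat) (hm : m < 2 ^ k) :
    (2 ^ (k + 1) - 1) ^^^ m = 2 ^ k ||| ((2 ^ k - 1) ^^^ m) := by
  apply Nat.eq_of_testBit_eq
  intro i
  simp only [Nat.testBit_xor, Nat.testBit_or, Nat.testBit_two_pow_sub_one, Nat.testBit_two_pow]
  rcases lt_trichotomy i k with h | h | h
  · have h1 : (decide (i < k + 1)) = true := by simp; omega
    have h2 : (decide (i < k)) = true := by simp [h]
    have h3 : (decide (k = i)) = false := by simp; omega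
    rw [h1, h2, h3]; cases m.testBit i <;> rfl
  · subst h
    have hmk : m.testBit i = false := Nat.testBit_eq_false_of_lt hm
    simp [hmk]
  · have hmk : m.testBit i = false := pv_testBit_ge_false m k i hm (by omega)
    have h1 : (decide (i < k + 1)) = false := by simp; omega
    have h2 : (decide (i < k)) = false := by simp; omega
    have h3 : (decide (k = i)) = false := by simp; omega
    rw [h1, h2, h3, hmk]; rfl

-- complementing 2^k + m (m < 2^k) inside k+1 bits clears bit k
theorem pv_xor_hi2 (k m : Nat) (hm : m < 2 ^ k) :
    (2 ^ (k + 1) - 1) ^^^ (2 ^ k + m) = (2 ^ k - 1) ^^^ m := by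
  rw [pv_pow_add_eq_or k m hm]
  apply Nat.eq_of_testBit_eq
  intro i
  simp only [Nat.testBit_xor, Nat.testBit_or, Nat.testBit_two_pow_sub_one, Nat.testBit_two_pow]
  rcases lt_trichotomy i k with h | h | h
  · have h1 : (decide (i < k + 1)) = true := by simp; omega
    have h2 : (decide (i < k)) = true := by simp [h]
    have h3 : (decide (k = i)) = false := by simp; omega
    rw [h1, h2, h3]; cases m.testBit i <;> rfl
  · subst h
    have hmk : m.testBit i = false := Nat.testBit_eq_false_of_lt hm
    simp [hmk]
  · have hmk : m.testBit i = false := pv_testBit_ge_false m k i hm (by omega)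
    have h1 : (decide (i < k + 1)) = false := by simp; omega
    have h2 : (decide (i < k)) = false := by simp; omega
    have h3 : (decide (k = i)) = false := by simp; omega
    rw [h1, h2, h3, hmk]; rfl

-- the greedy result is the first feasible mask of an ascending scan
theorem pv_pvG_eq_find (grid : List (List Int)) :
    ∀ (k : Nat) (av : Nat), pvG grid k av =
      (((List.range (2 ^ k)).find? (fun m => pvC grid (av ||| ((2 ^ k - 1) ^^^ m)))).getD
        (2 ^ k - 1)) := by
  intro k
  induction k with
  | zero =>
    intro av
    simp only [pvG, pow_zero, List.range_one, List.find?_cons]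
    cases h : pvC grid av <;> simp [h]
  | succ k ih =>
    intro av
    have h2 : (2 : Nat) ^ (k + 1) = 2 ^ k + 2 ^ k := by ring
    rw [h2, List.range_add, List.find?_append, List.find?_map]
    by_cases hC : pvC grid (av ||| 2 ^ k) = true
    · have hcg : List.find? (fun m => pvC grid (av ||| ((2 ^ k + 2 ^ k - 1) ^^^ m)))
            (List.range (2 ^ k))
          = List.find? (fun m => pvC grid ((av ||| 2 ^ k) ||| ((2 ^ k - 1) ^^^ m)))
            (List.range (2 ^ k)) := by
        apply pv_find?_congr
        intro m hm
        rw [show (2 ^ k + 2 ^ k - 1 : Nat) = 2 ^ (k + 1) - 1 from by rw [← h2],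
            pv_xor_hi k m (List.mem_range.1 hm), ← Nat.lor_assoc]
      rw [hcg]
      have hsome : (List.find? (fun m => pvC grid ((av ||| 2 ^ k) ||| ((2 ^ k - 1) ^^^ m)))
          (List.range (2 ^ k))).isSome := by
        rw [List.find?_isSome]
        refine ⟨2 ^ k - 1, List.mem_range.2 (by have := Nat.two_pow_pos k; omega), ?_⟩
        simpa [Nat.xor_self] using hC
      obtain ⟨v, hv⟩ := Option.isSome_iff_exists.1 hsome
      rw [hv, Option.some_or, pvG, if_pos hC, ih (av ||| 2 ^ k), hv]
      rfl
    · have hnone : List.find? (fun m => pvC grid (av ||| ((2 ^ k + 2 ^ k - 1) ^^^ m)))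
          (List.range (2 ^ k)) = none := by
        rw [List.find?_eq_none]
        intro m hm
        rw [show (2 ^ k + 2 ^ k - 1 : Nat) = 2 ^ (k + 1) - 1 from by rw [← h2],
            pv_xor_hi k m (List.mem_range.1 hm), ← Nat.lor_assoc]
        intro hcon
        exact hC (pvC_mono grid _ _ (pv_sub_or _ _) hcon)
      rw [hnone, Option.none_or]
      have hcg2 : List.find? ((fun m => pvC grid (av ||| ((2 ^ k + 2 ^ k - 1) ^^^ m))) ∘
            (fun x => 2 ^ k + x)) (List.range (2 ^ k))
          = List.find? (fun m => pvC grid (av ||| ((2 ^ k - 1) ^^^ m))) (List.range (2 ^ k)) := by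
        apply pv_find?_congr
        intro m hm
        simp only [Function.comp_apply]
        rw [show (2 ^ k + 2 ^ k - 1 : Nat) = 2 ^ (k + 1) - 1 from by rw [← h2],
            pv_xor_hi2 k m (List.mem_range.1 hm)]
      rw [hcg2, pvG, if_neg hC, ih av]
      cases hf : List.find? (fun m => pvC grid (av ||| ((2 ^ k - 1) ^^^ m))) (List.range (2 ^ k)) with
      | some v => simp
      | none =>
        simp only [Option.map_none, Option.getD_none]
        have := Nat.two_pow_pos k
        omega

-- ---- B's scan seen through patterns ----

theorem pv_scan_eq_find (pats : List (PySem.Set Int)) (l : List Int) :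
    pvScanB pats l =
      (l.find? (fun m => pats.all (fun ps =>
        ps.any (fun p => PySem.Int.band p (Int.not m) == 0)))).getD 131071 := by
  induction l with
  | nil => rfl
  | cons m rest ih =>
    simp only [pvScanB]
    rw [List.find?_cons]
    cases h : pats.all (fun ps => ps.any (fun p => PySem.Int.band p (Int.not m) == 0))
    · simp [ih]
    · simp

theorem pv_not_natCast (m : Nat) : Int.not ((m : Nat) : Int) = -((m : Nat) : Int) - 1 := by
  simp only [Int.not]
  rw [Int.negSucc_eq]
  ring

-- Python's  p & ~m == 0  is the submask test on naturals
theorem pv_band_not (p m : Nat) :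
    (PySem.Int.band (p : Int) (Int.not ((m : Nat) : Int)) == 0) = (p &&& m == p) := by
  have hneg : -((m : Nat) : Int) - 1 < 0 := by omega
  rw [pv_not_natCast, PySem.Int.band_comm, pv_band_neg _ hneg p]
  have hin : (-(-((m : Nat) : Int) - 1) - 1).toNat = m := by
    have : (-(-((m : Nat) : Int) - 1) - 1) = ((m : Nat) : Int) := by ring
    rw [this, Int.toNat_natCast]
  rw [hin, Bool.eq_iff_iff]
  simp only [beq_iff_eq, Nat.cast_eq_zero]
  have hle : p &&& m ≤ p := Nat.and_le_left
  omega

-- restricting to the complement of m inside 17 bits vanishes iff the pattern is a submask of m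
theorem pv_submask_equiv (p m : Nat) (hp : p < 2 ^ 17) :
    (p &&& (131071 ^^^ m) == 0) = (p &&& m == p) := by
  rw [Bool.eq_iff_iff]
  simp only [beq_iff_eq]
  rw [pv_nat_eq_zero_iff_testBit, pv_and_eq_self_iff]
  have h131 : ∀ i, (131071 : Nat).testBit i = decide (i < 17) := fun i => by
    rw [show (131071 : Nat) = 2 ^ 17 - 1 from by norm_num, Nat.testBit_two_pow_sub_one]
  constructor
  · intro h i hpi
    have hi := h i
    have hi17 : i < 17 := by
      by_contra hge
      rw [Nat.not_lt] at hge
      rw [pv_testBit_ge_false p 17 i hp hge] at hpi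
      exact Bool.false_ne_true hpi
    rw [Nat.testBit_and, Nat.testBit_xor, h131, hpi] at hi
    cases hm : m.testBit i
    · rw [hm] at hi; simp [hi17] at hi
    · rfl
  · intro h i
    rw [Nat.testBit_and, Nat.testBit_xor, h131]
    cases hpi : p.testBit i
    · simp
    · have hmi := h i hpi
      have hi17 : i < 17 := by
        by_contra hge
        rw [Nat.not_lt] at hge
        rw [pv_testBit_ge_false p 17 i hp hge] at hpi
        exact Bool.false_ne_true hpi
      simp [hmi, hi17]

-- B's per-mask feasibility test, elementwise
theorem pv_condB (grid : List (List Int)) (mN : Nat) :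
    ((grid.map (fun row => PySem.Set.ofList (row.map
        (fun x => PySem.Int.band x (((1 : Int) <<< (17 : Nat)) - 1))))).all
      (fun ps => ps.any (fun p => PySem.Int.band p (Int.not ((mN : Nat) : Int)) == 0)))
      = pvC grid (131071 ^^^ mN) := by
  rw [List.all_map]
  apply congrArg
  funext row
  simp only [Function.comp_apply]
  have hofl : ∀ (l : List Int) (f : Int → Bool), (PySem.Set.ofList l).any f = l.any f := by
    intro l f
    rw [Bool.eq_iff_iff]
    simp only [List.any_eq_true]
    constructor
    · rintro ⟨x, hx, hf⟩; exact ⟨x, (PySem.Set.mem_ofList l x).1 hx, hf⟩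
    · rintro ⟨x, hx, hf⟩; exact ⟨x, (PySem.Set.mem_ofList l x).2 hx, hf⟩
  rw [hofl, List.any_map]
  apply congrArg
  funext x
  simp only [Function.comp_apply]
  have hfull : ((1 : Int) <<< (17 : Nat)) - 1 = ((131071 : Nat) : Int) := by
    rw [pv_one_shl, Nat.one_shiftLeft]; norm_num
  have hc : (131071 : Int) = ((131071 : Nat) : Int) := by norm_num
  have hpat : PySem.Int.band x ((131071 : Nat) : Int) = ((pvPatN x : Nat) : Int) := by
    rw [pvPatN, ← hc]
    exact (Int.toNat_of_nonneg (by rw [hc]; exact pv_band_nonneg x 131071)).symm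
  rw [hfull, hpat, pv_band_not, ← pv_submask_equiv _ _ (pv_patN_lt x)]

-- B computes the first feasible mask of the ascending scan
set_option maxRecDepth 4096 in
theorem pv_altB (grid : List (List Int)) :
    minimumOR_alt grid =
      ((((List.range 131072).find? (fun m => pvC grid (131071 ^^^ m))).getD 131071 : Nat) : Int) := by
  simp only [minimumOR_alt]
  have hfull1 : (((1 : Int) <<< (17 : Nat)) - 1) + 1 = ((131072 : Nat) : Int) := by
    rw [pv_one_shl, Nat.one_shiftLeft]; norm_num
  rw [hfull1, PySem.List.pyRange_zero_natCast, pv_scan_eq_find, List.find?_map]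
  have hcg := pv_find?_congr
    ((fun m => (grid.map (fun row => PySem.Set.ofList (row.map
        (fun x => PySem.Int.band x (((1 : Int) <<< (17 : Nat)) - 1))))).all
      (fun ps => ps.any (fun p => PySem.Int.band p (Int.not m) == 0))) ∘ (fun k : Nat => (k : Int)))
    (fun m => pvC grid (131071 ^^^ m))
    (List.range 131072)
    (fun m _ => pv_condB grid m)
  rw [hcg]
  cases hf : List.find? (fun m => pvC grid (131071 ^^^ m)) (List.range 131072) with
  | some v => simp
  | none => simp

-- A computes the greedy recursion
theorem pv_A_eq (grid : List (List Int)) : minimumOR grid = ((pvG grid 17 0 : Nat) : Int) := by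
  unfold minimumOR
  have h0 : grid.map (fun row => row)
      = grid.map (fun row => row.filter (fun x => PySem.Int.band x (((0 : Nat) : Int)) == 0)) := by
    apply List.map_congr_left
    intro row _
    rw [show (row.filter (fun x => PySem.Int.band x (((0 : Nat) : Int)) == 0))
        = row.filter (fun _ => true) from List.filter_congr (fun x _ => by
          simp [PySem.Int.band_zero])]
    simp
  rw [h0, pv_fold_eq grid _ 0 0]
  have h17 : ((17 : Nat) : Int) - 1 = 16 := by norm_num
  have hmain := pv_foldB_eq_pvG grid 17 (le_refl 17) 0 0 (by norm_num)
  rw [h17] at hmain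
  simpa using hmain

-- ===== VERDICT (by name: the statement is the Claim_ definition above) =====
theorem minimumOR_spec : Claim_equal_minimumOR := by
  intro grid _
  show minimumOR grid = minimumOR_alt grid
  rw [pv_A_eq, pv_altB]
  have hfind := pv_pvG_eq_find grid 17 0
  have hcg := pv_find?_congr
    (fun m => pvC grid (0 ||| ((2 ^ 17 - 1) ^^^ m)))
    (fun m => pvC grid (131071 ^^^ m))
    (List.range (2 ^ 17))
    (fun m _ => by
      show pvC grid (0 ||| ((2 ^ 17 - 1) ^^^ m)) = pvC grid (131071 ^^^ m)
      rw [Nat.zero_or, show (2 ^ 17 - 1 : Nat) = 131071 from by norm_num])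
  rw [hcg] at hfind
  norm_num at hfind
  rw [hfind]
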